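-- pv_equiv track=rewrite | github.com/x746b/winforensics-mcp | winforensics_mcp/parsers/pe_analyzer.py | detect_suspicious_imports
-- ===== SOURCE A (Python) =====
-- def detect_suspicious_imports(imports: dict[str, list[str]]) -> list[str]:
--     """Detect suspicious API usage patterns"""
--     suspicious = []
--
--     # Suspicious APIs by category
--     suspicious_apis = {
--         "process_injection": [
--             "VirtualAllocEx", "WriteProcessMemory", "CreateRemoteThread",
--             "NtUnmapViewOfSection", "QueueUserAPC", "SetThreadContext",
--             "NtCreateThreadEx", "RtlCreateUserThread", "NtQueueApcThread",
--         ],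
--         "code_injection": [
--             "VirtualAlloc", "VirtualProtect", "WriteProcessMemory",
--             "NtWriteVirtualMemory", "NtProtectVirtualMemory",
--         ],
--         "credential_theft": [
--             "CredEnumerateA", "CredEnumerateW", "LsaRetrievePrivateData",
--             "SamQueryInformationUser", "SamGetPrivateData",
--         ],
--         "evasion": [
--             "IsDebuggerPresent", "CheckRemoteDebuggerPresent",
--             "NtQueryInformationProcess", "GetTickCount", "QueryPerformanceCounter",
--         ],
--         "persistence": [
--             "RegSetValueExA", "RegSetValueExW", "RegCreateKeyExA",
--             "CreateServiceA", "CreateServiceW",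
--         ],
--         "network": [
--             "InternetOpenA", "InternetOpenW", "URLDownloadToFileA",
--             "HttpSendRequestA", "WSAStartup", "connect", "send", "recv",
--         ],
--         "keylogging": [
--             "SetWindowsHookExA", "SetWindowsHookExW", "GetAsyncKeyState",
--             "GetKeyState", "GetKeyboardState",
--         ],
--         "screen_capture": [
--             "BitBlt", "GetDC", "GetWindowDC", "CreateCompatibleDC",
--         ],
--     }
--
--     # Flatten all imports
--     all_imports = []
--     for dll_funcs in imports.values():
--         all_imports.extend(dll_funcs)
--
--     # Check for suspicious patterns
--     for category, apis in suspicious_apis.items():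
--         found = [api for api in apis if api in all_imports]
--         if found:
--             if category == "process_injection" and len(found) >= 2:
--                 suspicious.append(f"Process injection APIs detected: {', '.join(found[:3])}")
--             elif category == "code_injection" and len(found) >= 2:
--                 suspicious.append(f"Code injection APIs detected: {', '.join(found[:3])}")
--             elif category == "credential_theft":
--                 suspicious.append(f"Credential access APIs detected: {', '.join(found[:3])}")
--             elif category == "evasion":
--                 suspicious.append(f"Anti-debugging/evasion APIs detected: {', '.join(found[:3])}")
--             elif category == "keylogging" and len(found) >= 2:
--                 suspicious.append(f"Keylogging APIs detected: {', '.join(found[:3])}")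
--
--     return suspicious
-- ===== SOURCE B (Python) =====
-- # Reverse-index rewrite: map each watched API name to its (category, position)
-- # pairs, make ONE dispatch pass over the imports collecting the present pairs,
-- # then reconstruct each category's found list from the collected positions.
-- _CATEGORIES = [
--     (["VirtualAllocEx", "WriteProcessMemory", "CreateRemoteThread",
--       "NtUnmapViewOfSection", "QueueUserAPC", "SetThreadContext",
--       "NtCreateThreadEx", "RtlCreateUserThread", "NtQueueApcThread"],
--      "Process injection APIs detected: ", 2),
--     (["VirtualAlloc", "VirtualProtect", "WriteProcessMemory",
--       "NtWriteVirtualMemory", "NtProtectVirtualMemory"],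
--      "Code injection APIs detected: ", 2),
--     (["CredEnumerateA", "CredEnumerateW", "LsaRetrievePrivateData",
--       "SamQueryInformationUser", "SamGetPrivateData"],
--      "Credential access APIs detected: ", 1),
--     (["IsDebuggerPresent", "CheckRemoteDebuggerPresent",
--       "NtQueryInformationProcess", "GetTickCount", "QueryPerformanceCounter"],
--      "Anti-debugging/evasion APIs detected: ", 1),
--     (["SetWindowsHookExA", "SetWindowsHookExW", "GetAsyncKeyState",
--       "GetKeyState", "GetKeyboardState"],
--      "Keylogging APIs detected: ", 2),
-- ]
--
-- # reverse index: API name -> list of (category id, position in that category)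
-- _INDEX: dict[str, list[tuple[int, int]]] = {}
-- for _cid, (_apis, _prefix, _thr) in enumerate(_CATEGORIES):
--     for _pos, _api in enumerate(_apis):
--         _INDEX.setdefault(_api, []).append((_cid, _pos))
--
--
-- def detect_suspicious_imports(imports: dict[str, list[str]]) -> list[str]:
--     """Detect suspicious API usage patterns"""
--     present = set()
--     for funcs in imports.values():
--         for f in funcs:
--             present.update(_INDEX.get(f, ()))
--     out = []
--     for cid, (apis, prefix, threshold) in enumerate(_CATEGORIES):
--         found = [apis[i] for i in range(len(apis)) if (cid, i) in present]
--         if len(found) >= threshold: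
--             out.append(prefix + ", ".join(found[:3]))
--     return out
-- ===== Notes on version B (the rewrite author's own statement) =====
-- stated objective: faster
-- what changed: B builds a reverse index from each watched API name to its (category, position) pairs, collects the present pairs in one dispatch pass over the imports, and reconstructs each category's found list from the collected positions, instead of A's per-category scans of the flattened import list and its elif chain.
import Mathlib
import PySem

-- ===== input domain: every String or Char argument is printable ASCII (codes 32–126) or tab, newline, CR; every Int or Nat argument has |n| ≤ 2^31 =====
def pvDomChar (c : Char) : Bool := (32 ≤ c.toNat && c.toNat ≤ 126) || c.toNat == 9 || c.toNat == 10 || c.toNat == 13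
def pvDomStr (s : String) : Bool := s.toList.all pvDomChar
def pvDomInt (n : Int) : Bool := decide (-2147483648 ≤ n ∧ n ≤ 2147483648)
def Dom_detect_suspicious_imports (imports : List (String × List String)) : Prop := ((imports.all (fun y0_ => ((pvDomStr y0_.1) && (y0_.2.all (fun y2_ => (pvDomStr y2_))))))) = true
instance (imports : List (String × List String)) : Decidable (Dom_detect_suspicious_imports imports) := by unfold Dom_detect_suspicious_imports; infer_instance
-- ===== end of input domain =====

-- B replaces A's per-category scans of the flattened import list by a reverse index
-- (API name -> (category, position) pairs), one dispatch pass collecting the present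
-- pairs, and a positional reconstruction of each category's found list
-- (objective: faster by a constant factor; equivalence is about the return value).

-- ===== PORT A =====
-- the suspicious_apis dict of A, in insertion order
def pvSuspiciousApis : List (String × List String) := [
  ("process_injection", ["VirtualAllocEx", "WriteProcessMemory", "CreateRemoteThread",
      "NtUnmapViewOfSection", "QueueUserAPC", "SetThreadContext",
      "NtCreateThreadEx", "RtlCreateUserThread", "NtQueueApcThread"]),
  ("code_injection", ["VirtualAlloc", "VirtualProtect", "WriteProcessMemory",
      "NtWriteVirtualMemory", "NtProtectVirtualMemory"]),
  ("credential_theft", ["CredEnumerateA", "CredEnumerateW", "LsaRetrievePrivateData",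
      "SamQueryInformationUser", "SamGetPrivateData"]),
  ("evasion", ["IsDebuggerPresent", "CheckRemoteDebuggerPresent",
      "NtQueryInformationProcess", "GetTickCount", "QueryPerformanceCounter"]),
  ("persistence", ["RegSetValueExA", "RegSetValueExW", "RegCreateKeyExA",
      "CreateServiceA", "CreateServiceW"]),
  ("network", ["InternetOpenA", "InternetOpenW", "URLDownloadToFileA",
      "HttpSendRequestA", "WSAStartup", "connect", "send", "recv"]),
  ("keylogging", ["SetWindowsHookExA", "SetWindowsHookExW", "GetAsyncKeyState",
      "GetKeyState", "GetKeyboardState"]),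
  ("screen_capture", ["BitBlt", "GetDC", "GetWindowDC", "CreateCompatibleDC"])]

def detect_suspicious_imports (imports : List (String × List String)) : List String :=
  -- all_imports = [];  for dll_funcs in imports.values(): all_imports.extend(dll_funcs)
  let all_imports := imports.foldl (fun acc p => acc ++ p.2) []
  -- for category, apis in suspicious_apis.items(): …
  pvSuspiciousApis.foldl (fun suspicious cat =>
    let found := cat.2.filter (fun api => all_imports.contains api)
    if found ≠ [] then
      if cat.1 = "process_injection" ∧ 2 ≤ found.length then
        suspicious ++ ["Process injection APIs detected: " ++ PySem.Str.join ", " (found.take 3)]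
      else if cat.1 = "code_injection" ∧ 2 ≤ found.length then
        suspicious ++ ["Code injection APIs detected: " ++ PySem.Str.join ", " (found.take 3)]
      else if cat.1 = "credential_theft" then
        suspicious ++ ["Credential access APIs detected: " ++ PySem.Str.join ", " (found.take 3)]
      else if cat.1 = "evasion" then
        suspicious ++ ["Anti-debugging/evasion APIs detected: " ++ PySem.Str.join ", " (found.take 3)]
      else if cat.1 = "keylogging" ∧ 2 ≤ found.length then
        suspicious ++ ["Keylogging APIs detected: " ++ PySem.Str.join ", " (found.take 3)]
      else suspicious
    else suspicious) []

-- ===== PORT B =====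
-- _CATEGORIES of Source B: (apis, message prefix, threshold)
def pvCats : List (List String × String × Nat) := [
  (["VirtualAllocEx", "WriteProcessMemory", "CreateRemoteThread",
    "NtUnmapViewOfSection", "QueueUserAPC", "SetThreadContext",
    "NtCreateThreadEx", "RtlCreateUserThread", "NtQueueApcThread"],
   "Process injection APIs detected: ", 2),
  (["VirtualAlloc", "VirtualProtect", "WriteProcessMemory",
    "NtWriteVirtualMemory", "NtProtectVirtualMemory"],
   "Code injection APIs detected: ", 2),
  (["CredEnumerateA", "CredEnumerateW", "LsaRetrievePrivateData",
    "SamQueryInformationUser", "SamGetPrivateData"],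
   "Credential access APIs detected: ", 1),
  (["IsDebuggerPresent", "CheckRemoteDebuggerPresent",
    "NtQueryInformationProcess", "GetTickCount", "QueryPerformanceCounter"],
   "Anti-debugging/evasion APIs detected: ", 1),
  (["SetWindowsHookExA", "SetWindowsHookExW", "GetAsyncKeyState",
    "GetKeyState", "GetKeyboardState"],
   "Keylogging APIs detected: ", 2)]

-- _INDEX of Source B, built by the same setdefault/append double loop
def pvIndex : PySem.Dict String (List (Int × Int)) :=
  (PySem.List.enumerate pvCats 0).foldl (fun d c =>
    (PySem.List.enumerate c.2.1 0).foldl (fun d pa =>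
      d.modify pa.2 [] (fun l => l ++ [(c.1, pa.1)])) d)
    PySem.Dict.empty

def detect_suspicious_imports_alt (imports : List (String × List String)) : List String :=
  -- present = set(); for funcs in imports.values(): for f in funcs: present.update(_INDEX.get(f, ()))
  let present := imports.foldl (fun pr p =>
    p.2.foldl (fun pr f => PySem.Set.update pr (PySem.Dict.getD pvIndex f [])) pr)
    PySem.Set.empty
  -- for cid, (apis, prefix, threshold) in enumerate(_CATEGORIES): …
  (PySem.List.enumerate pvCats 0).foldl (fun out c =>
    -- found = [apis[i] for i in range(len(apis)) if (cid, i) in present]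
    -- (apis[i] with 0 ≤ i < len(apis) is exact as pyGetD with any default)
    let found := ((PySem.List.pyRange 0 (c.2.1.length : Int) 1).filter
        (fun i => present.contains (c.1, i))).map (fun i => PySem.List.pyGetD c.2.1 i "")
    if c.2.2.2 ≤ found.length then out ++ [c.2.2.1 ++ PySem.Str.join ", " (found.take 3)]
    else out) []

-- ===== PRECONDITION & SPEC =====
def Spec_detect_suspicious_imports (imports : List (String × List String)) (out : List String) : Prop := out = detect_suspicious_imports_alt imports
instance (imports : List (String × List String)) (out : List String) : Decidable (Spec_detect_suspicious_imports imports out) := by unfold Spec_detect_suspicious_imports; infer_instance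

-- ===== CLAIM (what is proved, stated in full; the proofs are below) =====
def Claim_equal_detect_suspicious_imports : Prop := ∀ (imports : List (String × List String)), Dom_detect_suspicious_imports imports → Spec_detect_suspicious_imports imports (detect_suspicious_imports imports)

-- ===== LEMMAS AND PROOFS =====

-- pvIndex evaluated: its items as a literal association list
def pvIndexItems : List (String × List (Int × Int)) := [
  ("VirtualAllocEx", [(0, 0)]),
  ("WriteProcessMemory", [(0, 1), (1, 2)]),
  ("CreateRemoteThread", [(0, 2)]),
  ("NtUnmapViewOfSection", [(0, 3)]),
  ("QueueUserAPC", [(0, 4)]),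
  ("SetThreadContext", [(0, 5)]),
  ("NtCreateThreadEx", [(0, 6)]),
  ("RtlCreateUserThread", [(0, 7)]),
  ("NtQueueApcThread", [(0, 8)]),
  ("VirtualAlloc", [(1, 0)]),
  ("VirtualProtect", [(1, 1)]),
  ("NtWriteVirtualMemory", [(1, 3)]),
  ("NtProtectVirtualMemory", [(1, 4)]),
  ("CredEnumerateA", [(2, 0)]),
  ("CredEnumerateW", [(2, 1)]),
  ("LsaRetrievePrivateData", [(2, 2)]),
  ("SamQueryInformationUser", [(2, 3)]),
  ("SamGetPrivateData", [(2, 4)]),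
  ("IsDebuggerPresent", [(3, 0)]),
  ("CheckRemoteDebuggerPresent", [(3, 1)]),
  ("NtQueryInformationProcess", [(3, 2)]),
  ("GetTickCount", [(3, 3)]),
  ("QueryPerformanceCounter", [(3, 4)]),
  ("SetWindowsHookExA", [(4, 0)]),
  ("SetWindowsHookExW", [(4, 1)]),
  ("GetAsyncKeyState", [(4, 2)]),
  ("GetKeyState", [(4, 3)]),
  ("GetKeyboardState", [(4, 4)])]

lemma pvIndex_items : pvIndex.items = pvIndexItems := by decide

lemma pvIndex_nodup : pvIndex.keys.Nodup := by decide

-- characterisation of B's index lookups: membership in _INDEX.get(f, ())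
lemma mem_getD_pvIndex (f : String) (cp : Int × Int) :
    cp ∈ PySem.Dict.getD pvIndex f [] ↔ ∃ vs, (f, vs) ∈ pvIndexItems ∧ cp ∈ vs := by
  rw [PySem.Dict.getD_eq_get?_getD, ← pvIndex_items]
  cases h : pvIndex.get? f with
  | none =>
    simp only [Option.getD_none, List.not_mem_nil, false_iff]
    rintro ⟨vs, hm, -⟩
    have := PySem.Dict.get?_of_mem_items _ hm pvIndex_nodup
    rw [h] at this; cases this
  | some vs =>
    simp only [Option.getD_some]
    constructor
    · intro hx
      exact ⟨vs, PySem.Dict.mem_items_of_get?_eq_some _ h, hx⟩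
    · rintro ⟨ws, hm, hx⟩
      have := PySem.Dict.get?_of_mem_items _ hm pvIndex_nodup
      rw [h] at this
      cases this
      exact hx

-- membership in B's present set after the dispatch pass over one dll's functions
lemma mem_fold_inner (fs : List String) (pr : PySem.Set (Int × Int)) (cp : Int × Int) :
    cp ∈ fs.foldl (fun pr f => PySem.Set.update pr (PySem.Dict.getD pvIndex f [])) pr
      ↔ cp ∈ pr ∨ ∃ f ∈ fs, cp ∈ PySem.Dict.getD pvIndex f [] := by
  induction fs generalizing pr with
  | nil => simp
  | cons x xs ih =>
    simp only [List.foldl_cons, ih, PySem.Set.mem_update, List.mem_cons]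
    constructor
    · rintro (⟨h | h⟩ | ⟨f, hf, h⟩)
      · exact Or.inl h
      · exact Or.inr ⟨x, Or.inl rfl, h⟩
      · exact Or.inr ⟨f, Or.inr hf, h⟩
    · rintro (h | ⟨f, (rfl | hf), h⟩)
      · exact Or.inl (Or.inl h)
      · exact Or.inl (Or.inr h)
      · exact Or.inr ⟨f, hf, h⟩

-- membership in B's present set over the whole import table
lemma mem_fold_outer (imports : List (String × List String)) (pr : PySem.Set (Int × Int)) (cp : Int × Int) :
    cp ∈ imports.foldl (fun pr p =>
        p.2.foldl (fun pr f => PySem.Set.update pr (PySem.Dict.getD pvIndex f [])) pr) pr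
      ↔ cp ∈ pr ∨ ∃ f ∈ imports.flatMap (fun p => p.2), cp ∈ PySem.Dict.getD pvIndex f [] := by
  induction imports generalizing pr with
  | nil => simp
  | cons p ps ih =>
    simp only [List.foldl_cons, ih, mem_fold_inner, List.flatMap_cons, List.mem_append]
    constructor
    · rintro (⟨h | ⟨f, hf, h⟩⟩ | ⟨f, hf, h⟩)
      · exact Or.inl h
      · exact Or.inr ⟨f, Or.inl hf, h⟩
      · exact Or.inr ⟨f, Or.inr hf, h⟩
    · rintro (h | ⟨f, (hf | hf), h⟩)
      · exact Or.inl (Or.inl h)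
      · exact Or.inl (Or.inr ⟨f, hf, h⟩)
      · exact Or.inr ⟨f, hf, h⟩

-- present's membership = some imported function maps to the pair
lemma mem_present (imports : List (String × List String)) (cp : Int × Int) :
    cp ∈ imports.foldl (fun pr p =>
        p.2.foldl (fun pr f => PySem.Set.update pr (PySem.Dict.getD pvIndex f [])) pr)
        PySem.Set.empty
      ↔ ∃ f ∈ imports.foldl (fun acc p => acc ++ p.2) [], cp ∈ PySem.Dict.getD pvIndex f [] := by
  rw [PySem.List.foldl_append_eq_flatMap, mem_fold_outer]
  simp [PySem.Set.empty]

-- index-comprehension reconstruction equals a direct filter (Nat core)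
lemma idx_filter_map (l : List String) (Q : String → Bool) :
    ((List.range l.length).filter (fun i => Q (l.getD i ""))).map (fun i => l.getD i "")
      = l.filter Q := by
  induction l with
  | nil => simp
  | cons x xs ih =>
    rw [List.length_cons, List.range_succ_eq_map]
    by_cases hq : Q x <;>
      simp [hq, List.filter_map, List.map_map, Function.comp_def] <;>
      simpa [List.getD_eq_getElem?_getD] using ih

-- the same over Python's range of ints
lemma recon (l : List String) (P : Int → Bool) (Q : String → Bool)
    (h : ∀ k : Nat, k < l.length → P (k : Int) = Q (l.getD k "")) :
    ((PySem.List.pyRange 0 (l.length : Int) 1).filter P).map (fun i => PySem.List.pyGetD l i "")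
      = l.filter Q := by
  rw [PySem.List.pyRange_one]
  simp only [List.filter_map, List.map_map, Function.comp_def, zero_add, sub_zero,
    Int.toNat_natCast, PySem.List.pyGetD_natCast]
  rw [← idx_filter_map l Q]
  apply congrArg
  apply List.filter_congr
  intro k hk
  rw [List.mem_range] at hk
  exact h k hk


-- present at (cid = 0, k) is exactly "category 0's k-th API was imported"
lemma cat0 (all : List String) (present : PySem.Set (Int × Int))
    (hp : ∀ cp : Int × Int, cp ∈ present ↔ ∃ f ∈ all, cp ∈ PySem.Dict.getD pvIndex f []) :
    ∀ k : Nat, k < 9 →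
      present.contains ((0 : Int), (k : Int)) = all.contains
        ((["VirtualAllocEx", "WriteProcessMemory", "CreateRemoteThread",
           "NtUnmapViewOfSection", "QueueUserAPC", "SetThreadContext",
           "NtCreateThreadEx", "RtlCreateUserThread", "NtQueueApcThread"] : List String).getD k "") := by
  intro k hk
  interval_cases k <;>
  · rw [Bool.eq_iff_iff, PySem.Set.contains_iff, List.contains_iff_mem, hp]
    simp [mem_getD_pvIndex, pvIndexItems, and_assoc, or_and_right, exists_or]

-- present at (cid = 1, k) is exactly "category 1's k-th API was imported"
lemma cat1 (all : List String) (present : PySem.Set (Int × Int))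
    (hp : ∀ cp : Int × Int, cp ∈ present ↔ ∃ f ∈ all, cp ∈ PySem.Dict.getD pvIndex f []) :
    ∀ k : Nat, k < 5 →
      present.contains ((1 : Int), (k : Int)) = all.contains
        ((["VirtualAlloc", "VirtualProtect", "WriteProcessMemory",
           "NtWriteVirtualMemory", "NtProtectVirtualMemory"] : List String).getD k "") := by
  intro k hk
  interval_cases k <;>
  · rw [Bool.eq_iff_iff, PySem.Set.contains_iff, List.contains_iff_mem, hp]
    simp [mem_getD_pvIndex, pvIndexItems, and_assoc, or_and_right, exists_or]

-- present at (cid = 2, k) is exactly "category 2's k-th API was imported"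
lemma cat2 (all : List String) (present : PySem.Set (Int × Int))
    (hp : ∀ cp : Int × Int, cp ∈ present ↔ ∃ f ∈ all, cp ∈ PySem.Dict.getD pvIndex f []) :
    ∀ k : Nat, k < 5 →
      present.contains ((2 : Int), (k : Int)) = all.contains
        ((["CredEnumerateA", "CredEnumerateW", "LsaRetrievePrivateData",
           "SamQueryInformationUser", "SamGetPrivateData"] : List String).getD k "") := by
  intro k hk
  interval_cases k <;>
  · rw [Bool.eq_iff_iff, PySem.Set.contains_iff, List.contains_iff_mem, hp]
    simp [mem_getD_pvIndex, pvIndexItems, and_assoc, or_and_right, exists_or]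

-- present at (cid = 3, k) is exactly "category 3's k-th API was imported"
lemma cat3 (all : List String) (present : PySem.Set (Int × Int))
    (hp : ∀ cp : Int × Int, cp ∈ present ↔ ∃ f ∈ all, cp ∈ PySem.Dict.getD pvIndex f []) :
    ∀ k : Nat, k < 5 →
      present.contains ((3 : Int), (k : Int)) = all.contains
        ((["IsDebuggerPresent", "CheckRemoteDebuggerPresent",
           "NtQueryInformationProcess", "GetTickCount", "QueryPerformanceCounter"] : List String).getD k "") := by
  intro k hk
  interval_cases k <;>
  · rw [Bool.eq_iff_iff, PySem.Set.contains_iff, List.contains_iff_mem, hp]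
    simp [mem_getD_pvIndex, pvIndexItems, and_assoc, or_and_right, exists_or]

-- present at (cid = 4, k) is exactly "category 4's k-th API was imported"
lemma cat4 (all : List String) (present : PySem.Set (Int × Int))
    (hp : ∀ cp : Int × Int, cp ∈ present ↔ ∃ f ∈ all, cp ∈ PySem.Dict.getD pvIndex f []) :
    ∀ k : Nat, k < 5 →
      present.contains ((4 : Int), (k : Int)) = all.contains
        ((["SetWindowsHookExA", "SetWindowsHookExW", "GetAsyncKeyState",
           "GetKeyState", "GetKeyboardState"] : List String).getD k "") := by
  intro k hk
  interval_cases k <;>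
  · rw [Bool.eq_iff_iff, PySem.Set.contains_iff, List.contains_iff_mem, hp]
    simp [mem_getD_pvIndex, pvIndexItems, and_assoc, or_and_right, exists_or]

lemma ite_two (found s : List String) (x : String) :
    (if found = [] then s else (if 2 ≤ found.length then s ++ [x] else s))
      = (if 2 ≤ found.length then s ++ [x] else s) := by
  cases found <;> simp

lemma ite_one (found s : List String) (x : String) :
    (if found = [] then s else s ++ [x]) = (if 1 ≤ found.length then s ++ [x] else s) := by
  cases found <;> simp

set_option maxHeartbeats 4000000 in
theorem main_core (all : List String) (present : PySem.Set (Int × Int))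
    (hp : ∀ cp : Int × Int, cp ∈ present ↔ ∃ f ∈ all, cp ∈ PySem.Dict.getD pvIndex f []) :
    (pvSuspiciousApis.foldl (fun suspicious cat =>
      let found := cat.2.filter (fun api => all.contains api)
      if found ≠ [] then
        if cat.1 = "process_injection" ∧ 2 ≤ found.length then
          suspicious ++ ["Process injection APIs detected: " ++ PySem.Str.join ", " (found.take 3)]
        else if cat.1 = "code_injection" ∧ 2 ≤ found.length then
          suspicious ++ ["Code injection APIs detected: " ++ PySem.Str.join ", " (found.take 3)]
        else if cat.1 = "credential_theft" then
          suspicious ++ ["Credential access APIs detected: " ++ PySem.Str.join ", " (found.take 3)]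
        else if cat.1 = "evasion" then
          suspicious ++ ["Anti-debugging/evasion APIs detected: " ++ PySem.Str.join ", " (found.take 3)]
        else if cat.1 = "keylogging" ∧ 2 ≤ found.length then
          suspicious ++ ["Keylogging APIs detected: " ++ PySem.Str.join ", " (found.take 3)]
        else suspicious
      else suspicious) [])
    = ((PySem.List.enumerate pvCats 0).foldl (fun out c =>
      let found := ((PySem.List.pyRange 0 (c.2.1.length : Int) 1).filter
          (fun i => present.contains (c.1, i))).map (fun i => PySem.List.pyGetD c.2.1 i "")
      if c.2.2.2 ≤ found.length then out ++ [c.2.2.1 ++ PySem.Str.join ", " (found.take 3)]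
      else out) []) := by
  have h0 := recon ["VirtualAllocEx", "WriteProcessMemory", "CreateRemoteThread", "NtUnmapViewOfSection", "QueueUserAPC", "SetThreadContext", "NtCreateThreadEx", "RtlCreateUserThread", "NtQueueApcThread"] (fun i => present.contains ((0 : Int), i)) (fun a => all.contains a) (cat0 all present hp)
  have h1 := recon ["VirtualAlloc", "VirtualProtect", "WriteProcessMemory", "NtWriteVirtualMemory", "NtProtectVirtualMemory"] (fun i => present.contains ((1 : Int), i)) (fun a => all.contains a) (cat1 all present hp)
  have h2 := recon ["CredEnumerateA", "CredEnumerateW", "LsaRetrievePrivateData", "SamQueryInformationUser", "SamGetPrivateData"] (fun i => present.contains ((2 : Int), i)) (fun a => all.contains a) (cat2 all present hp)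
  have h3 := recon ["IsDebuggerPresent", "CheckRemoteDebuggerPresent", "NtQueryInformationProcess", "GetTickCount", "QueryPerformanceCounter"] (fun i => present.contains ((3 : Int), i)) (fun a => all.contains a) (cat3 all present hp)
  have h4 := recon ["SetWindowsHookExA", "SetWindowsHookExW", "GetAsyncKeyState", "GetKeyState", "GetKeyboardState"] (fun i => present.contains ((4 : Int), i)) (fun a => all.contains a) (cat4 all present hp)
  simp only [pvSuspiciousApis, pvCats, PySem.List.enumerate_cons, PySem.List.enumerate_nil,
    List.foldl_cons, List.foldl_nil, zero_add, Int.reduceAdd, h0, h1, h2, h3, h4,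
    String.reduceEq, false_and, if_false, true_and, ite_self, if_true, ite_not]
  simp only [ite_two, ite_one]

-- ===== VERDICT (by name: the statement is the Claim_ definition above) =====
theorem detect_suspicious_imports_spec : Claim_equal_detect_suspicious_imports := by
  intro imports _
  show detect_suspicious_imports imports = detect_suspicious_imports_alt imports
  unfold detect_suspicious_imports detect_suspicious_imports_alt
  exact main_core _ _ (fun cp => mem_present imports cp)
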